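-- pv_equiv track=rewrite | github.com/gwarmstrong/fast-faith-pd-benchmarking | benchmark/table.py | prep_args
-- ===== SOURCE A (Python) =====
-- import itertools
--
-- def prep_args(otu_sizes=None, sample_sizes=None, reps=1):
--     """Generates (otu_size, sample_size, rep_number, seed) pairs
--
--     Parameters
--     ----------
--
--     otu_sizes : Optional[list[int]]
--         Specifies the sizes for OTU sets that should be chosen. If None,
--          uses all OTUs for all tables.
--
--     sample_sizes : Optional[list[int]]
--         Specifies the sizes for sample sets taht should be chose. If
--          None, uses all samples for all tables.
--
--     reps : Optional[int]
--         Specifies the number of repetitions that each `otu_size` x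
--          `sample_size` pair should be used to generate a new table.
--
--
--     Returns
--     -------
--
--     list[tuple]
--         Each tuple contains (otu_size, sample_size, rep_number, seed)
--          for a single table subset
--
--     """
--     if otu_sizes is None:
--         otu_sizes = [None]
--     if sample_sizes is None:
--         sample_sizes = [None]
--
--     total_subsets = len(otu_sizes)*len(sample_sizes)*reps
--     size_combs = list(itertools.product(otu_sizes, sample_sizes))
--
--     # TODO can probably be done better using zip
--     size_reps = [(*size_comb, i) for i in range(reps) for
--                  size_comb in size_combs]
--     seeds = range(total_subsets)
--     sizes_with_seeds = [(*size_reps[seed], seed) for seed in seeds]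
--
--     return sizes_with_seeds
-- ===== SOURCE B (Python) =====
-- def prep_args(otu_sizes=None, sample_sizes=None, reps=1):
--     if otu_sizes is None:
--         otu_sizes = [None]
--     if sample_sizes is None:
--         sample_sizes = [None]
--     n_o = len(otu_sizes)
--     n_s = len(sample_sizes)
--     return [(otu_sizes[seed // n_s % n_o],
--              sample_sizes[seed % n_s],
--              seed // (n_o * n_s),
--              seed)
--             for seed in range(n_o * n_s * reps)]
-- ===== Notes on version B (the rewrite author's own statement) =====
-- stated objective: alternative
-- what changed: Replaces itertools.product, the two intermediate comprehension lists and the seed-index lookup with a single comprehension that computes each (otu, sample, rep, seed) tuple directly from its seed by floor-division/mod arithmetic.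
import Mathlib
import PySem

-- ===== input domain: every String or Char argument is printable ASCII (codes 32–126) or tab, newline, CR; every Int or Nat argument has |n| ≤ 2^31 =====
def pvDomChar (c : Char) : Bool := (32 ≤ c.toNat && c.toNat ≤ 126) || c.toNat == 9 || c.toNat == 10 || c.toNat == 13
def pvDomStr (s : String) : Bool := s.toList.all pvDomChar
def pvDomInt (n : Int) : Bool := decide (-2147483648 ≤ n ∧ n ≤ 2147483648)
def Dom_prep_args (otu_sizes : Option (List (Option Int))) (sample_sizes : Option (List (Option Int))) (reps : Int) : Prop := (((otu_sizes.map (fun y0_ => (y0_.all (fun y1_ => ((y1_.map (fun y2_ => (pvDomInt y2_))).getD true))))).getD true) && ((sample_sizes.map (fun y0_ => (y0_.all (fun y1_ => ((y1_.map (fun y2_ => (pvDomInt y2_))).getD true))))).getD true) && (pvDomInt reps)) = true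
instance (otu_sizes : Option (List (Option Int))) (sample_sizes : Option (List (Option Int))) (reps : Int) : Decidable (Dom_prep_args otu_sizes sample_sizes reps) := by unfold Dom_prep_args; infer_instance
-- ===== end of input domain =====

-- B replaces A's product/comprehension pipeline by a single comprehension that computes each tuple from its seed via floor-division/mod (objective: alternative).

-- ===== PORT A =====
-- Literal port of A: product list, the size_reps comprehension, then the seed-indexed comprehension.
-- size_reps[seed] is always in range (seed < total = len(size_reps)); the `none` branch of pyGet?
-- is unreachable and carries an arbitrary value.
def prep_args (otu_sizes : Option (List (Option Int))) (sample_sizes : Option (List (Option Int))) (reps : Int) : List (Option Int × Option Int × Int × Int) :=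
  let otu := otu_sizes.getD [none]
  let samp := sample_sizes.getD [none]
  let total : Int := (otu.length : Int) * (samp.length : Int) * reps
  let size_combs : List (Option Int × Option Int) := otu.flatMap (fun o => samp.map (fun s => (o, s)))
  let size_reps : List (Option Int × Option Int × Int) :=
    (PySem.List.pyRange 0 reps 1).flatMap (fun i => size_combs.map (fun c => (c.1, c.2, i)))
  let seeds := PySem.List.pyRange 0 total 1
  seeds.map (fun seed =>
    match PySem.List.pyGet? size_reps seed with
    | some t => (t.1, t.2.1, t.2.2, seed)
    | none => (none, none, 0, 0))

-- ===== PORT B =====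
-- Literal port of B: one comprehension over range(n_o*n_s*reps), each tuple computed from its
-- seed by floor-division/mod arithmetic.  The list indices are always in range for seeds the
-- range produces; the `none` branches of pyGet? are unreachable and carry an arbitrary value.
def prep_args_alt (otu_sizes : Option (List (Option Int))) (sample_sizes : Option (List (Option Int))) (reps : Int) : List (Option Int × Option Int × Int × Int) :=
  let otu := otu_sizes.getD [none]
  let samp := sample_sizes.getD [none]
  let n_o : Int := otu.length
  let n_s : Int := samp.length
  (PySem.List.pyRange 0 (n_o * n_s * reps) 1).map (fun seed =>
    ((match PySem.List.pyGet? otu (PySem.Int.mod (PySem.Int.floordiv seed n_s) n_o) with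
      | some v => v | none => none),
     (match PySem.List.pyGet? samp (PySem.Int.mod seed n_s) with
      | some v => v | none => none),
     PySem.Int.floordiv seed (n_o * n_s),
     seed))

-- ===== PRECONDITION & SPEC =====
def Spec_prep_args (otu_sizes : Option (List (Option Int))) (sample_sizes : Option (List (Option Int))) (reps : Int) (out : List (Option Int × Option Int × Int × Int)) : Prop := out = prep_args_alt otu_sizes sample_sizes reps
instance (otu_sizes : Option (List (Option Int))) (sample_sizes : Option (List (Option Int))) (reps : Int) (out : List (Option Int × Option Int × Int × Int)) : Decidable (Spec_prep_args otu_sizes sample_sizes reps out) := by unfold Spec_prep_args; infer_instance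

-- ===== CLAIM (what is proved, stated in full; the proofs are below) =====
def Claim_equal_prep_args : Prop := ∀ (otu_sizes : Option (List (Option Int))) (sample_sizes : Option (List (Option Int))) (reps : Int), Dom_prep_args otu_sizes sample_sizes reps → Spec_prep_args otu_sizes sample_sizes reps (prep_args otu_sizes sample_sizes reps)

-- ===== LEMMAS AND PROOFS =====

-- seedTag l c: l's triples tagged with consecutive seeds starting at c (the common normal form).
def seedTag (l : List (Option Int × Option Int × Int)) (c : Int) : List (Option Int × Option Int × Int × Int) :=
  match l with
  | [] => []
  | t :: r => (t.1, t.2.1, t.2.2, c) :: seedTag r (c + 1)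

theorem seedTag_append (a b : List (Option Int × Option Int × Int)) (c : Int) :
    seedTag (a ++ b) c = seedTag a c ++ seedTag b (c + a.length) := by
  induction a generalizing c with
  | nil => simp [seedTag]
  | cons x xs ih =>
    simp only [List.cons_append, seedTag, ih, List.length_cons]
    have h2 : c + ((xs.length + 1 : Nat) : Int) = c + 1 + (xs.length : Int) := by push_cast; ring
    rw [h2]

theorem seedTag_length (l : List (Option Int × Option Int × Int)) (c : Int) :
    (seedTag l c).length = l.length := by
  induction l generalizing c with
  | nil => rfl
  | cons x xs ih => simp [seedTag, ih]

theorem seedTag_getElem? (l : List (Option Int × Option Int × Int)) (c : Int) (k : Nat) :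
    (seedTag l c)[k]? = l[k]?.map (fun t => (t.1, t.2.1, t.2.2, c + (k : Int))) := by
  induction l generalizing c k with
  | nil => simp [seedTag]
  | cons x xs ih =>
    cases k with
    | zero => simp [seedTag]
    | succ k =>
      simp only [seedTag, List.getElem?_cons_succ, ih]
      have h2 : c + 1 + (k : Int) = c + ((k + 1 : Nat) : Int) := by push_cast; ring
      rw [h2]

-- A's final comprehension over range(len l) with l[seed] is seedTag l 0.
theorem A_char (l : List (Option Int × Option Int × Int)) :
    (PySem.List.pyRange 0 (l.length : Int) 1).map (fun seed =>
      match PySem.List.pyGet? l seed with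
      | some t => (t.1, t.2.1, t.2.2, seed)
      | none => ((none : Option Int), (none : Option Int), (0 : Int), (0 : Int)))
    = seedTag l 0 := by
  induction l using List.reverseRecOn with
  | nil => simp [PySem.List.pyRange_one_eq_nil, seedTag]
  | append_singleton l x ih =>
    have hlen : ((l ++ [x]).length : Int) = (l.length : Int) + 1 := by
      simp
    rw [hlen, PySem.List.pyRange_one_succ_right (by positivity)]
    rw [List.map_append, List.map_singleton]
    have hlast : PySem.List.pyGet? (l ++ [x]) (l.length : Int) = some x := by
      rw [PySem.List.pyGet?_natCast]
      simp
    have hfirst : (PySem.List.pyRange 0 (l.length : Int) 1).map (fun seed =>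
        match PySem.List.pyGet? (l ++ [x]) seed with
        | some t => (t.1, t.2.1, t.2.2, seed)
        | none => ((none : Option Int), (none : Option Int), (0 : Int), (0 : Int)))
        = (PySem.List.pyRange 0 (l.length : Int) 1).map (fun seed =>
        match PySem.List.pyGet? l seed with
        | some t => (t.1, t.2.1, t.2.2, seed)
        | none => ((none : Option Int), (none : Option Int), (0 : Int), (0 : Int))) := by
      apply List.map_congr_left
      intro s hs
      rw [PySem.List.mem_pyRange_one] at hs
      have h1 : PySem.List.pyGet? (l ++ [x]) s = PySem.List.pyGet? l s := by
        rw [PySem.List.pyGet?_of_nonneg (l ++ [x]) hs.1, PySem.List.pyGet?_of_nonneg l hs.1]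
        have : s.toNat < l.length := by omega
        rw [List.getElem?_append_left this]
      rw [h1]
    rw [hfirst, ih, hlast, seedTag_append]
    simp [seedTag]

-- size_reps (as it appears in A) is the flat list of per-rep blocks.
theorem size_reps_eq (otu samp : List (Option Int)) (reps : Int) :
    (PySem.List.pyRange 0 reps 1).flatMap (fun i =>
      (otu.flatMap (fun o => samp.map (fun s => (o, s)))).map (fun c => (c.1, c.2, i)))
    = (PySem.List.pyRange 0 reps 1).flatMap (fun i =>
        otu.flatMap (fun o => samp.map (fun s => (o, s, i)))) := by
  simp [List.map_flatMap, Function.comp_def]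

theorem block_length (otu samp : List (Option Int)) (i : Int) :
    (otu.flatMap (fun o => samp.map (fun s => (o, s, i)))).length
    = otu.length * samp.length := by
  rw [List.length_flatMap]
  simp only [List.length_map]
  rw [List.map_const', List.sum_replicate, smul_eq_mul]

theorem flat_length (otu samp : List (Option Int)) (reps : Int) :
    ((PySem.List.pyRange 0 reps 1).flatMap (fun i =>
        otu.flatMap (fun o => samp.map (fun s => (o, s, i))))).length
    = (reps - 0).toNat * (otu.length * samp.length) := by
  rw [List.length_flatMap]
  simp only [block_length]
  rw [List.map_const', List.sum_replicate, smul_eq_mul, PySem.List.length_pyRange_one]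

-- getElem? of a flatMap whose blocks all have length m: divmod on the index.
theorem flatMap_getElem? {α β : Type} (f : α → List β) (m : Nat)
    (hm : ∀ a, (f a).length = m) :
    ∀ (is : List α) (k : Nat), k < is.length * m →
      (is.flatMap f)[k]? = is[k / m]?.bind (fun a => (f a)[k % m]?) := by
  intro is
  induction is with
  | nil => intro k hk; simp at hk
  | cons a tl ih =>
    intro k hk
    have hm0 : 0 < m := by
      rcases Nat.eq_zero_or_pos m with h | h
      · rw [h, Nat.mul_zero] at hk; omega
      · exact h
    by_cases hkm : k < m
    · have hk' : k < (f a).length := by rw [hm a]; exact hkm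
      rw [List.flatMap_cons, List.getElem?_append_left (by simpa [hm a] using hkm)]
      rw [Nat.div_eq_of_lt hkm, Nat.mod_eq_of_lt hkm]
      simp
    · push_neg at hkm
      have hk2 : k - m < tl.length * m := by
        have : k < tl.length * m + m := by
          have := hk
          rw [List.length_cons, Nat.succ_mul] at this
          omega
        omega
      rw [List.flatMap_cons, List.getElem?_append_right (by rw [hm a]; exact hkm)]
      rw [hm a, ih (k - m) hk2]
      rw [Nat.div_eq_sub_div hm0 hkm, Nat.mod_eq_sub_mod hkm]
      simp

theorem prep_args_eq (otu_sizes : Option (List (Option Int))) (sample_sizes : Option (List (Option Int))) (reps : Int) :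
    prep_args otu_sizes sample_sizes reps = prep_args_alt otu_sizes sample_sizes reps := by
  unfold prep_args prep_args_alt
  simp only []
  set otu := otu_sizes.getD [none] with hotu
  set samp := sample_sizes.getD [none] with hsamp
  rw [size_reps_eq]
  set L := (PySem.List.pyRange 0 reps 1).flatMap (fun i =>
      otu.flatMap (fun o => samp.map (fun s => (o, s, i)))) with hL
  by_cases hr : 0 ≤ reps
  · have hlen : ((otu.length : Int) * (samp.length : Int) * reps) = (L.length : Int) := by
      rw [hL, flat_length]
      push_cast [Int.toNat_of_nonneg (by omega : (0:Int) ≤ reps - 0)]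
      ring
    rw [hlen, A_char]
    rw [PySem.List.pyRange_one]
    apply List.ext_getElem?
    intro k
    rcases Nat.lt_or_ge k L.length with hk | hk
    · -- element case
      have hNval : L.length = (reps - 0).toNat * (otu.length * samp.length) := by
        rw [hL, flat_length]
      have hm0 : 0 < otu.length * samp.length := by
        rcases Nat.eq_zero_or_pos (otu.length * samp.length) with h | h
        · rw [hNval, h, Nat.mul_zero] at hk; omega
        · exact h
      have ho : 0 < otu.length := by
        rcases Nat.eq_zero_or_pos otu.length with h | h
        · rw [h, Nat.zero_mul] at hm0; omega
        · exact h
      have hs : 0 < samp.length := by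
        rcases Nat.eq_zero_or_pos samp.length with h | h
        · rw [h, Nat.mul_zero] at hm0; omega
        · exact h
      -- left side: seedTag elementwise
      have hidx1 : (k % (otu.length * samp.length)) / samp.length < otu.length := by
        have h1 : k % (otu.length * samp.length) < otu.length * samp.length := Nat.mod_lt _ hm0
        exact (Nat.div_lt_iff_lt_mul hs).mpr h1
      have hLk : L[k]? = some (otu[(k % (otu.length * samp.length)) / samp.length]'hidx1,
          samp[(k % (otu.length * samp.length)) % samp.length]'(Nat.mod_lt _ hs),
          ((k / (otu.length * samp.length) : Nat) : Int)) := by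
        rw [hL, flatMap_getElem? _ (otu.length * samp.length) (block_length otu samp)
              (PySem.List.pyRange 0 reps 1) k (by rw [PySem.List.length_pyRange_one]; omega)]
        have hdivlt : k / (otu.length * samp.length) < (reps - 0).toNat := by
          exact (Nat.div_lt_iff_lt_mul hm0).mpr (by omega)
        have hrange : (PySem.List.pyRange 0 reps 1)[k / (otu.length * samp.length)]?
            = some ((k / (otu.length * samp.length) : Nat) : Int) := by
          have hdivlt2 : k / (otu.length * samp.length) < reps.toNat := by omega
          rw [PySem.List.pyRange_one]
          simp [List.getElem?_range, hdivlt, hdivlt2]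
        rw [hrange]
        simp only [Option.bind_some]
        rw [flatMap_getElem? _ samp.length (by intro o; simp)
              otu (k % (otu.length * samp.length)) (Nat.mod_lt _ hm0)]
        have h2 : (k % (otu.length * samp.length)) / samp.length < otu.length := by
          have h1 : k % (otu.length * samp.length) < otu.length * samp.length := Nat.mod_lt _ hm0
          exact (Nat.div_lt_iff_lt_mul hs).mpr (by rw [Nat.mul_comm] at h1 ⊢; exact h1)
        simp [List.getElem?_eq_getElem, h2, Nat.mod_lt _ hs]
      rw [seedTag_getElem?, hLk]
      -- right side
      rw [List.getElem?_map, List.getElem?_map,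
          List.getElem?_range (by simp; omega : k < ((L.length : Int) - 0).toNat)]
      simp only [Option.map_some, Option.map_map]
      -- compute B's tuple at seed = k
      have hfl : ((0 : Int) + (k : Int)) = ((k : Nat) : Int) := by simp
      congr 1
      simp only [hfl, PySem.Int.floordiv_natCast, PySem.Int.mod_natCast]
      have hcast : ((otu.length : Int) * (samp.length : Int)) = ((otu.length * samp.length : Nat) : Int) := by
        push_cast; ring
      rw [hcast, PySem.Int.floordiv_natCast]
      have ho_idx : k / samp.length % otu.length < otu.length := Nat.mod_lt _ ho
      have hs_idx : k % samp.length < samp.length := Nat.mod_lt _ hs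
      rw [PySem.List.pyGet?_natCast, PySem.List.pyGet?_natCast]
      rw [List.getElem?_eq_getElem ho_idx, List.getElem?_eq_getElem hs_idx]
      simp only []
      have i1 : (k % (otu.length * samp.length)) / samp.length = k / samp.length % otu.length := by
        rw [Nat.mul_comm]
        exact Nat.mod_mul_right_div_self k samp.length otu.length
      have i2 : (k % (otu.length * samp.length)) % samp.length = k % samp.length := by
        exact Nat.mod_mod_of_dvd k ⟨otu.length, Nat.mul_comm otu.length samp.length⟩
      simp only [i1, i2]
    · -- out of range on both sides: none = none
      have h1 : (seedTag L 0).length ≤ k := by rw [seedTag_length]; exact hk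
      rw [List.getElem?_eq_none h1, List.getElem?_eq_none (by simp <;> omega)]
  · push_neg at hr
    have htot : (otu.length : Int) * (samp.length : Int) * reps ≤ 0 := by
      have h1 : (0:Int) ≤ (otu.length : Int) * (samp.length : Int) := by positivity
      nlinarith
    rw [PySem.List.pyRange_one_eq_nil htot]
    simp

-- ===== VERDICT (by name: the statement is the Claim_ definition above) =====
theorem prep_args_spec : Claim_equal_prep_args := by
  intro otu_sizes sample_sizes reps _
  unfold Spec_prep_args
  exact prep_args_eq otu_sizes sample_sizes reps
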